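-- pv_equiv track=rewrite | github.com/lucacorbucci/AdventOfCode-2025 | day_1/day_1.py | solution
-- ===== SOURCE A (Python) =====
-- def solution(input_data: list) -> int:
--     current_position = 50
--     result = 0
--     max_value = 100
--
--     for direction, distance in input_data:
--         distance = distance if direction == "R" else -distance
--         difference = current_position + distance
--         if difference < 0:
--             if current_position != 0:
--                 result += 1
--             result += abs(difference) // max_value
--         elif difference in (0, max_value):
--             result += 1
--         elif difference > max_value:
--             result += 1
--             result += abs(distance - (max_value - current_position)) // max_value
--
--         current_position = (current_position + distance) % max_value
--
--     return result
-- ===== SOURCE B (Python) =====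
-- def solution(input_data: list) -> int:
--     pos = 50  # absolute, unreduced position
--     result = 0
--     for direction, distance in input_data:
--         d = distance if direction == "R" else -distance
--         new = pos + d
--         lo, hi = (pos, new) if pos <= new else (new, pos)
--         if lo < hi:
--             result += (hi - 1) // 100 - lo // 100  # multiples of 100 strictly inside (lo, hi)
--         if new % 100 == 0:
--             result += 1
--         pos = new
--     return result
-- ===== Notes on version B (the rewrite author's own statement) =====
-- stated objective: simpler
-- what changed: Tracks an absolute (unreduced) position and counts per step the multiples of 100 strictly inside the travelled interval via floor division plus one if the step lands on a multiple, replacing A's 4-way case analysis over a mod-100 position.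
import Mathlib
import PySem

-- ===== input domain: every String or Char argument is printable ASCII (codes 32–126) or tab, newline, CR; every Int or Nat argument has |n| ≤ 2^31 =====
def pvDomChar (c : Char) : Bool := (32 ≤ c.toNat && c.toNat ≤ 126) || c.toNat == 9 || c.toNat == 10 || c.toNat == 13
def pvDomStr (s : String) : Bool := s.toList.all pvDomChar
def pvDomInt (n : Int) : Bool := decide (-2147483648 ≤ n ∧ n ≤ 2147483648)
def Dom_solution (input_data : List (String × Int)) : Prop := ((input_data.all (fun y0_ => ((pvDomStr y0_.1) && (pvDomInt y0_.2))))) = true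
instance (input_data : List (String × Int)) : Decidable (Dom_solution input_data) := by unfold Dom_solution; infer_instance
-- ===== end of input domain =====

-- B replaces A's 4-way modular case analysis by an absolute running position with a uniform
-- floor-division count of the 100-multiples crossed per step (objective: simpler).


-- ===== PORT A =====
-- one iteration of A's for-loop; state = (current_position, result)
def solutionStepA (st : Int × Int) (x : String × Int) : Int × Int :=
  let distance : Int := if x.1 == "R" then x.2 else -x.2
  let difference : Int := st.1 + distance
  let r : Int :=
    if difference < 0 then
      (if st.1 ≠ 0 then st.2 + 1 else st.2) + PySem.Int.floordiv |difference| 100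
    else if difference = 0 ∨ difference = 100 then st.2 + 1
    else if difference > 100 then
      st.2 + 1 + PySem.Int.floordiv |distance - (100 - st.1)| 100
    else st.2
  (PySem.Int.mod (st.1 + distance) 100, r)

def solution (input_data : List (String × Int)) : Int :=
  (input_data.foldl solutionStepA (50, 0)).2

-- ===== PORT B =====
-- one iteration of B's loop; state = (pos, result), pos absolute (never reduced mod 100)
def solutionStepB (st : Int × Int) (x : String × Int) : Int × Int :=
  let d : Int := if x.1 == "R" then x.2 else -x.2
  let nw : Int := st.1 + d
  let lo : Int := if st.1 ≤ nw then st.1 else nw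
  let hi : Int := if st.1 ≤ nw then nw else st.1
  let r : Int :=
    if lo < hi then st.2 + (PySem.Int.floordiv (hi - 1) 100 - PySem.Int.floordiv lo 100)
    else st.2
  let r : Int := if PySem.Int.mod nw 100 = 0 then r + 1 else r
  (nw, r)

def solution_alt (input_data : List (String × Int)) : Int :=
  (input_data.foldl solutionStepB (50, 0)).2

-- ===== PRECONDITION & SPEC =====
def Spec_solution (input_data : List (String × Int)) (out : Int) : Prop := out = solution_alt input_data
instance (input_data : List (String × Int)) (out : Int) : Decidable (Spec_solution input_data out) := by unfold Spec_solution; infer_instance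

-- ===== CLAIM (what is proved, stated in full; the proofs are below) =====
def Claim_equal_solution : Prop := ∀ (input_data : List (String × Int)), Dom_solution input_data → Spec_solution input_data (solution input_data)

-- ===== LEMMAS AND PROOFS =====

-- one step preserves the invariant: equal results, and A's position is B's position mod 100
lemma solution_step_inv (p P r : Int) (x : String × Int) (hp : p = PySem.Int.mod P 100) :
    (solutionStepA (p, r) x).1 = PySem.Int.mod (solutionStepB (P, r) x).1 100 ∧
    (solutionStepA (p, r) x).2 = (solutionStepB (P, r) x).2 := by
  simp only [solutionStepA, solutionStepB]
  have hP : PySem.Int.mod P 100 = P % 100 := PySem.Int.mod_eq_emod_of_pos (by norm_num)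
  set d : Int := (if x.1 == "R" then x.2 else -x.2) with hd
  constructor
  · rw [PySem.Int.mod_eq_emod_of_pos (by norm_num), PySem.Int.mod_eq_emod_of_pos (by norm_num), hp, hP]
    omega
  · rw [hp, hP] at *
    have h1 : PySem.Int.mod (P + d) 100 = (P + d) % 100 := PySem.Int.mod_eq_emod_of_pos (by norm_num)
    rw [h1]
    rw [PySem.Int.floordiv_eq_ediv_of_pos (b := 100) (by norm_num),
        PySem.Int.floordiv_eq_ediv_of_pos (b := 100) (by norm_num),
        PySem.Int.floordiv_eq_ediv_of_pos (b := 100) (by norm_num),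
        PySem.Int.floordiv_eq_ediv_of_pos (b := 100) (by norm_num)]
    rw [abs_sub_comm, Int.abs_eq_natAbs, Int.abs_eq_natAbs]
    split_ifs <;> omega

-- the fold preserves the invariant along the whole list
lemma solution_fold_inv (l : List (String × Int)) (p P r : Int) (hp : p = PySem.Int.mod P 100) :
    (l.foldl solutionStepA (p, r)).2 = (l.foldl solutionStepB (P, r)).2 := by
  induction l generalizing p P r with
  | nil => rfl
  | cons x xs ih =>
    simp only [List.foldl_cons]
    obtain ⟨h1, h2⟩ := solution_step_inv p P r x hp
    rw [show solutionStepA (p, r) x = ((solutionStepA (p, r) x).1, (solutionStepA (p, r) x).2) from rfl,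
        show solutionStepB (P, r) x = ((solutionStepB (P, r) x).1, (solutionStepB (P, r) x).2) from rfl]
    rw [h2]
    exact ih _ _ _ h1

-- ===== VERDICT (by name: the statement is the Claim_ definition above) =====
theorem solution_spec : Claim_equal_solution := by
  intro input_data _
  unfold Spec_solution solution solution_alt
  exact solution_fold_inv input_data 50 50 0 (by decide)
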